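-- pv_equiv track=rewrite | github.com/username5012/TIL-LOG-_Programmers | 프로그래머스/unrated/181896. 첫 번째로 나오는 음수/첫 번째로 나오는 음수.py | solution
-- ===== SOURCE A (Python) =====
-- def solution(num_list):
--     answer = 0
--     minus = 0
--
--     for i in num_list:
--         if i < 0:
--             minus = i
--             break
--
--     if minus != 0:
--         answer = num_list.index(minus)
--     else:
--         answer = -1
--
--     return answer
-- ===== SOURCE B (Python) =====
-- def solution(num_list):
--     for i, v in enumerate(num_list):
--         if v < 0:
--             return i
--     return -1
-- ===== Notes on version B (the rewrite author's own statement) =====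
-- stated objective: simpler
-- what changed: B finds the first negative's index in a single enumerate pass, replacing A's break-out value scan followed by a second .index() rescan of the list.
import Mathlib
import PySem

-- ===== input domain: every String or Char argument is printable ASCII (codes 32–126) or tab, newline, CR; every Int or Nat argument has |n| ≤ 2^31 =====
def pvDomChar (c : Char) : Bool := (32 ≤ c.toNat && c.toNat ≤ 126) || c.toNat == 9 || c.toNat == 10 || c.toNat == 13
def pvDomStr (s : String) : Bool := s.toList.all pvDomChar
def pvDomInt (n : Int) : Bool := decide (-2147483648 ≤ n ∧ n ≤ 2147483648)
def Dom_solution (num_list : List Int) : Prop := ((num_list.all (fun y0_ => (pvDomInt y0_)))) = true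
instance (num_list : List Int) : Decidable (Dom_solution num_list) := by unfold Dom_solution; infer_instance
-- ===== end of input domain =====

-- B replaces A's two-pass scheme (break-out value scan + .index() rescan) with a single enumerate-style pass tracking the index inline; same values everywhere.


-- ===== PORT A =====
-- first value < 0 (0 if none), as A's for-loop with break computes it
def aFindMinus (l : List Int) : Int :=
  match l with
  | [] => 0
  | x :: xs => if x < 0 then x else aFindMinus xs

def solution (num_list : List Int) : Int :=
  let minus := aFindMinus num_list
  if minus ≠ 0 then
    match PySem.List.index? num_list minus with
    | some k => (k : Int)
    | none => -1      -- unreachable: minus ≠ 0 implies minus ∈ num_list (Python would raise ValueError)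
  else -1

-- ===== PORT B =====
def bGo (l : List Int) (i : Int) : Int :=
  match l with
  | [] => -1
  | x :: xs => if x < 0 then i else bGo xs (i + 1)

def solution_alt (num_list : List Int) : Int := bGo num_list 0

-- ===== PRECONDITION & SPEC =====
def Spec_solution (num_list : List Int) (out : Int) : Prop := out = solution_alt num_list
instance (num_list : List Int) (out : Int) : Decidable (Spec_solution num_list out) := by unfold Spec_solution; infer_instance

-- ===== CLAIM (what is proved, stated in full; the proofs are below) =====
def Claim_equal_solution : Prop := ∀ (num_list : List Int), Dom_solution num_list → Spec_solution num_list (solution num_list)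

-- ===== LEMMAS AND PROOFS =====

-- ===== VERDICT (by name: the statement is the Claim_ definition above) =====
lemma aFindMinus_neg (l : List Int) (h : aFindMinus l ≠ 0) : aFindMinus l < 0 := by
  induction l with
  | nil => simp [aFindMinus] at h
  | cons x xs ih =>
    simp only [aFindMinus] at h ⊢
    split <;> simp_all

lemma aFindMinus_mem (l : List Int) (h : aFindMinus l ≠ 0) : aFindMinus l ∈ l := by
  induction l with
  | nil => simp [aFindMinus] at h
  | cons x xs ih =>
    simp only [aFindMinus] at h ⊢
    split <;> simp_all

lemma bGo_shift (l : List Int) (h : aFindMinus l ≠ 0) (i : Int) :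
    bGo l (i + 1) = bGo l i + 1 := by
  induction l generalizing i with
  | nil => simp [aFindMinus] at h
  | cons x xs ih =>
    simp only [aFindMinus] at h
    simp only [bGo]
    split
    · rfl
    · next hx =>
      have : aFindMinus xs ≠ 0 := by simp_all
      exact ih this (i + 1)

lemma bGo_none (l : List Int) (h : aFindMinus l = 0) (i : Int) : bGo l i = -1 := by
  induction l generalizing i with
  | nil => simp [bGo]
  | cons x xs ih =>
    simp only [aFindMinus] at h
    simp only [bGo]
    split
    · omega
    · exact ih (by simp_all) (i + 1)

lemma main_lemma (l : List Int) : solution l = bGo l 0 := by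
  induction l with
  | nil => simp [solution, aFindMinus, bGo]
  | cons x xs ih =>
    by_cases hx : x < 0
    · have hxne : x ≠ 0 := by omega
      simp only [solution, aFindMinus, bGo, if_pos hx, if_pos (by exact hxne : x ≠ 0)]
      rw [PySem.List.index?_cons_self]
      rfl
    · simp only [solution, aFindMinus, if_neg hx] at ih ⊢
      simp only [bGo, if_neg hx]
      by_cases hm : aFindMinus xs = 0
      · rw [if_neg (by simp [hm]), bGo_none xs hm (0 + 1)]
      · have hneg := aFindMinus_neg xs hm
        have hmem := aFindMinus_mem xs hm
        have hxne : x ≠ aFindMinus xs := by omega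
        rw [if_pos hm] at ih ⊢
        rw [PySem.List.index?_cons_of_ne (v := aFindMinus xs) (xs := xs) hxne]
        obtain ⟨k, hk⟩ := (PySem.List.index?_isSome_iff xs (aFindMinus xs)).2 hmem |> Option.isSome_iff_exists.mp
        rw [hk] at ih ⊢
        rw [bGo_shift xs hm 0, ← ih]
        simp only [Option.map_some]
        push_cast; ring

theorem solution_spec : Claim_equal_solution := by
  intro l _
  unfold Spec_solution solution_alt
  exact main_lemma l
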